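-- pv_equiv track=rewrite | github.com/jarssoft/kuntakirja | parsefamily.py | etaisyydet
-- ===== SOURCE A (Python) =====
-- def ero(nimi, vnimi):
--     return abs(ord(nimi[0])-ord(vnimi[0]))*255 + abs(ord(nimi[1])-ord(vnimi[1]))
--
-- def etaisyydet(nimet):
--     pal=[]
--     for nimi in nimet:
--         erot=0
--         for vnimi in nimet:
--             erot+=ero(nimi, vnimi)
--         pal.append(erot)
--     return pal
-- ===== SOURCE B (Python) =====
-- def _costs(vals):
--     # value -> sum of |value - w| over all w in vals, via sort + running prefix sum
--     s = sorted(vals)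
--     n = len(s)
--     total = sum(s)
--     cost = {}
--     left = 0  # sum of s[:i]
--     for i, v in enumerate(s):
--         cost[v] = v * i - left + (total - left) - v * (n - i)
--         left += v
--     return cost
--
-- def etaisyydet(nimet):
--     xs = [ord(n[0]) for n in nimet]
--     ys = [ord(n[1]) for n in nimet]
--     cx = _costs(xs)
--     cy = _costs(ys)
--     return [255 * cx[x] + cy[y] for x, y in zip(xs, ys)]
-- ===== Notes on version B (the rewrite author's own statement) =====
-- stated objective: faster
-- what changed: Replaced the all-pairs O(n^2) double loop by per-coordinate decomposition: sort each coordinate, one pass with running prefix sums builds a value->total-distance dict, then one lookup per name.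
import Mathlib
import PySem

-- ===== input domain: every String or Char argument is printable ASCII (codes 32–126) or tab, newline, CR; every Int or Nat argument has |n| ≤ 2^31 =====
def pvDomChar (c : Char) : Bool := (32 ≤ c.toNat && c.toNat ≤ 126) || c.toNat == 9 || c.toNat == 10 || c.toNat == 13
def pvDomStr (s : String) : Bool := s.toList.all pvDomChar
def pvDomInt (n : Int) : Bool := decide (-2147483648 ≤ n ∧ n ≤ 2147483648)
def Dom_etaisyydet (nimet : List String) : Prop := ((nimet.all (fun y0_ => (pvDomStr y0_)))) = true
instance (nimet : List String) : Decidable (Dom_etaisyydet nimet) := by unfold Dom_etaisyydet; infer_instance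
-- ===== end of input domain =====

-- B replaces A's all-pairs O(n^2) scan by per-coordinate sort + prefix-sum dictionaries (objective: faster, asymptotic).

-- ===== PORT A =====
def ero (nimi vnimi : String) : Int :=
  match PySem.Str.pyGet? nimi 0, PySem.Str.pyGet? vnimi 0,
        PySem.Str.pyGet? nimi 1, PySem.Str.pyGet? vnimi 1 with
  | some a, some b, some c, some d =>
      |(a.toNat : Int) - (b.toNat : Int)| * 255 + |(c.toNat : Int) - (d.toNat : Int)|
  | _, _, _, _ => 0   -- Python raises IndexError here; excluded by Pre_etaisyydet

def etaisyydet (nimet : List String) : List Int :=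
  nimet.foldl
    (fun pal nimi =>
      pal ++ [nimet.foldl (fun erot vnimi => erot + ero nimi vnimi) 0])
    []

-- ===== PORT B =====
-- ord(n[0]) / ord(n[1]); none (IndexError) excluded by Pre_etaisyydet
def ord0 (nm : String) : Int :=
  match PySem.Str.pyGet? nm 0 with | some c => (c.toNat : Int) | none => 0
def ord1 (nm : String) : Int :=
  match PySem.Str.pyGet? nm 1 with | some c => (c.toNat : Int) | none => 0

-- _costs(vals): sort, then one pass with a running prefix sum `left`
def pvCosts (vals : List Int) : PySem.Dict Int Int :=
  let s := PySem.List.sorted vals (fun x => x) false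
  let n : Int := (s.length : Int)
  let total := s.sum
  ((PySem.List.enumerate s 0).foldl
      (fun (acc : PySem.Dict Int Int × Int) p =>
        (acc.1.insert p.2 (p.2 * p.1 - acc.2 + (total - acc.2) - p.2 * (n - p.1)),
         acc.2 + p.2))
      (PySem.Dict.empty, 0)).1

def etaisyydet_alt (nimet : List String) : List Int :=
  let xs := nimet.map ord0
  let ys := nimet.map ord1
  let cx := pvCosts xs
  let cy := pvCosts ys
  (xs.zip ys).map (fun p => 255 * ((cx.get? p.1).getD 0) + ((cy.get? p.2).getD 0))

-- ===== PRECONDITION & SPEC =====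
-- Pre_ excludes exactly the inputs where A (and B) raise IndexError: a name of fewer than 2 characters.
def Pre_etaisyydet (nimet : List String) : Prop := ∀ s ∈ nimet, 2 ≤ s.toList.length
instance (nimet : List String) : Decidable (Pre_etaisyydet nimet) := by
  unfold Pre_etaisyydet; infer_instance

def pvWitness_etaisyydet : List String := (["ab", "zz", "Ka"])

def Spec_etaisyydet (nimet : List String) (out : List Int) : Prop := out = etaisyydet_alt nimet
instance (nimet : List String) (out : List Int) : Decidable (Spec_etaisyydet nimet out) := by
  unfold Spec_etaisyydet; infer_instance

-- ===== CLAIM (what is proved, stated in full; the proofs are below) =====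
def Claim_equal_etaisyydet : Prop :=
  ∀ (nimet : List String), Dom_etaisyydet nimet → Pre_etaisyydet nimet →
    Spec_etaisyydet nimet (etaisyydet nimet)

-- ===== LEMMAS AND PROOFS =====

-- sum over l of |v - y|
def distSum (v : Int) (l : List Int) : Int := (l.map (fun y => |v - y|)).sum

theorem distSum_of_le (v : Int) (l : List Int) (h : ∀ y ∈ l, y ≤ v) :
    distSum v l = v * l.length - l.sum := by
  induction l with
  | nil => simp [distSum]
  | cons x t ih =>
    have hx : x ≤ v := h x (by simp)
    have ht := ih (fun y hy => h y (by simp [hy]))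
    simp only [distSum, List.map_cons, List.sum_cons, List.length_cons] at *
    rw [abs_of_nonneg (by omega), ht]
    push_cast; ring

theorem distSum_of_ge (v : Int) (l : List Int) (h : ∀ y ∈ l, v ≤ y) :
    distSum v l = l.sum - v * l.length := by
  induction l with
  | nil => simp [distSum]
  | cons x t ih =>
    have hx : v ≤ x := h x (by simp)
    have ht := ih (fun y hy => h y (by simp [hy]))
    simp only [distSum, List.map_cons, List.sum_cons, List.length_cons] at *
    rw [abs_of_nonpos (by omega), ht]
    push_cast; ring

theorem distSum_append (v : Int) (l₁ l₂ : List Int) :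
    distSum v (l₁ ++ l₂) = distSum v l₁ + distSum v l₂ := by
  simp [distSum]

theorem distSum_perm {l₁ l₂ : List Int} (h : l₁.Perm l₂) (v : Int) :
    distSum v l₁ = distSum v l₂ :=
  (h.map (fun y => |v - y|)).sum_eq

-- sorted split formula at position j
theorem distSum_sorted (s : List Int) (hs : s.Pairwise (· ≤ ·)) (j : Nat) (hj : j < s.length) :
    distSum s[j] s =
      s[j] * (j : Int) - (s.take j).sum + (s.sum - (s.take j).sum)
        - s[j] * ((s.length : Int) - (j : Int)) := by
  have hpw : ∀ p q, (hp : p < s.length) → (hq : q < s.length) → p < q → s[p] ≤ s[q] := by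
    intro p q hp hq hpq
    exact List.pairwise_iff_getElem.mp hs p q hp hq hpq
  have hle : ∀ y ∈ s.take j, y ≤ s[j] := by
    intro y hy
    obtain ⟨p, hp, rfl⟩ := List.mem_take_iff_getElem.mp hy
    exact hpw p j (by omega) hj (by omega)
  have hge : ∀ y ∈ s.drop j, s[j] ≤ y := by
    intro y hy
    obtain ⟨k, hk, rfl⟩ := List.mem_iff_getElem.mp hy
    have hk' : j + k < s.length := by
      have := hk; simp [List.length_drop] at this; omega
    rw [List.getElem_drop]
    rcases Nat.eq_zero_or_pos k with h0 | h0
    · subst h0; simp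
    · exact hpw j (j + k) hj hk' (by omega)
  have h1 := distSum_of_le s[j] (s.take j) hle
  have h2 := distSum_of_ge s[j] (s.drop j) hge
  have hsum : (s.take j).sum + (s.drop j).sum = s.sum := by
    conv_rhs => rw [← List.take_append_drop j s]
    simp
  have hlen1 : (s.take j).length = j := by simp [List.length_take]; omega
  have hlen2 : ((s.drop j).length : Int) = (s.length : Int) - (j : Int) := by
    simp [List.length_drop]; omega
  have hd : distSum s[j] s = distSum s[j] (s.take j) + distSum s[j] (s.drop j) := by
    rw [← distSum_append, List.take_append_drop]
  rw [hd, h1, h2, hlen1, hlen2]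
  have : (s.drop j).sum = s.sum - (s.take j).sum := by omega
  rw [this]; ring

-- generic fold-with-insert invariant: every insertion for key w stores F w
theorem fold_insert_inv (g : Int → Int → Int → Int) (F : Int → Int) :
    ∀ (l : List (Int × Int)) (d : PySem.Dict Int Int) (left : Int),
      (∀ (j : Nat) (hj : j < l.length),
        g l[j].1 (left + ((l.take j).map Prod.snd).sum) l[j].2 = F l[j].2) →
      ∀ v,
        ((l.foldl (fun acc p => (acc.1.insert p.2 (g p.1 acc.2 p.2), acc.2 + p.2)) (d, left)).1).get? v
          = if v ∈ l.map Prod.snd then some (F v) else d.get? v := by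
  intro l
  induction l with
  | nil => intro d left _ v; simp
  | cons p t ih =>
    intro d left h v
    have h0 : g p.1 left p.2 = F p.2 := by
      have := h 0 (by simp)
      simpa using this
    have hstep : ∀ (j : Nat) (hj : j < t.length),
        g t[j].1 (left + p.2 + ((t.take j).map Prod.snd).sum) t[j].2 = F t[j].2 := by
      intro j hj
      have := h (j + 1) (by simp; omega)
      simpa [List.take_succ_cons, add_assoc] using this
    simp only [List.foldl_cons]
    rw [ih (d.insert p.2 (g p.1 left p.2)) (left + p.2) hstep v]
    by_cases hv : v ∈ t.map Prod.snd
    · simp [hv]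
    · by_cases hvp : v = p.2
      · simp [hvp, h0]
      · simp [hv, hvp, PySem.Dict.get?_insert]

-- take of enumerate is enumerate of take
theorem enumerate_take {α : Type} :
    ∀ (s : List α) (k : Int) (j : Nat),
      (PySem.List.enumerate s k).take j = PySem.List.enumerate (s.take j) k := by
  intro s
  induction s with
  | nil => intro k j; simp [PySem.List.enumerate_nil]
  | cons x t ih =>
    intro k j
    cases j with
    | zero => simp [PySem.List.enumerate_nil]
    | succ j => simp [PySem.List.enumerate_cons, ih]

theorem costs_correct (vals : List Int) (v : Int) (hv : v ∈ vals) :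
    (pvCosts vals).get? v = some (distSum v vals) := by
  set s := PySem.List.sorted vals (fun x => x) false with hsdef
  have hperm : s.Perm vals := by
    rw [hsdef]; exact PySem.List.sorted_perm _ _ _
  have hvs : v ∈ s := hperm.mem_iff.mpr hv
  have hpw : s.Pairwise (· ≤ ·) := by
    have := PySem.List.sorted_pairwise (xs := vals) (key := fun x => x)
    simpa [hsdef] using this
  have H : ∀ (j : Nat) (hj : j < (PySem.List.enumerate s 0).length),
      (fun (i left w : Int) => w * i - left + (s.sum - left) - w * ((s.length : Int) - i))
          (PySem.List.enumerate s 0)[j].1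
          (0 + (((PySem.List.enumerate s 0).take j).map Prod.snd).sum)
          (PySem.List.enumerate s 0)[j].2
        = (fun w => distSum w s) (PySem.List.enumerate s 0)[j].2 := by
    intro j hj
    have hj' : j < s.length := by simpa [PySem.List.length_enumerate] using hj
    simp only [enumerate_take, PySem.List.getElem_enumerate, PySem.List.map_snd_enumerate]
    rw [distSum_sorted s hpw j hj']
    ring
  have key := fold_insert_inv
      (fun (i left w : Int) => w * i - left + (s.sum - left) - w * ((s.length : Int) - i))
      (fun w => distSum w s)
      (PySem.List.enumerate s 0) PySem.Dict.empty 0 H v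
  have hmem : v ∈ (PySem.List.enumerate s 0).map Prod.snd := by
    rw [PySem.List.map_snd_enumerate]; exact hvs
  rw [if_pos hmem] at key
  have hfin : (pvCosts vals).get? v = some (distSum v s) := key
  rw [hfin, distSum_perm hperm]

theorem foldl_append_map {α β : Type} (f : α → β) :
    ∀ (l : List α) (acc : List β),
      l.foldl (fun pal x => pal ++ [f x]) acc = acc ++ l.map f := by
  intro l
  induction l with
  | nil => intro acc; simp
  | cons x t ih => intro acc; simp [ih]

theorem foldl_add_eq_sum {α : Type} (f : α → Int) :
    ∀ (l : List α) (a : Int), l.foldl (fun e x => e + f x) a = a + (l.map f).sum := by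
  intro l
  induction l with
  | nil => intro a; simp
  | cons x t ih => intro a; simp [ih]; ring

theorem sum_split {α : Type} (f g : α → Int) (l : List α) :
    (l.map (fun x => f x * 255 + g x)).sum = 255 * (l.map f).sum + (l.map g).sum := by
  induction l with
  | nil => simp
  | cons x t ih => simp [ih]; ring

theorem str_get_some (s : String) (k : Nat) (h : k < s.toList.length) :
    PySem.Str.pyGet? s (k : Int) = some s.toList[k] := by
  rw [PySem.Str.pyGet?_natCast]
  simp [List.getElem?_eq_getElem h]

theorem ero_eq (nimi vnimi : String)
    (h1 : 2 ≤ nimi.toList.length) (h2 : 2 ≤ vnimi.toList.length) :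
    ero nimi vnimi = |ord0 nimi - ord0 vnimi| * 255 + |ord1 nimi - ord1 vnimi| := by
  have e0 := str_get_some nimi 0 (by omega)
  have e1 := str_get_some nimi 1 (by omega)
  have f0 := str_get_some vnimi 0 (by omega)
  have f1 := str_get_some vnimi 1 (by omega)
  simp only [Nat.cast_zero, Nat.cast_one, PySem.Str.pyGet?_eq, PySem.Chars.pyGet?_eq_listPyGet?] at e0 e1 f0 f1
  simp [ero, ord0, ord1, e0, e1, f0, f1]

-- ===== VERDICT (by name: the statement is the Claim_ definition above) =====
theorem etaisyydet_spec : Claim_equal_etaisyydet := by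
  intro nimet _ hpre
  show etaisyydet nimet = etaisyydet_alt nimet
  have hA : etaisyydet nimet
      = nimet.map (fun nimi => (nimet.map (fun v => ero nimi v)).sum) := by
    unfold etaisyydet
    rw [foldl_append_map]
    simp [foldl_add_eq_sum]
  have hB : etaisyydet_alt nimet
      = nimet.map (fun nimi =>
          255 * (((pvCosts (nimet.map ord0)).get? (ord0 nimi)).getD 0)
            + (((pvCosts (nimet.map ord1)).get? (ord1 nimi)).getD 0)) := by
    unfold etaisyydet_alt
    dsimp only
    rw [List.zip_map']
    simp [List.map_map, Function.comp_def]
  rw [hA, hB]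
  apply List.map_congr_left
  intro nimi hni
  have h1 := hpre nimi hni
  have hrw : nimet.map (fun v => ero nimi v)
      = nimet.map (fun v => |ord0 nimi - ord0 v| * 255 + |ord1 nimi - ord1 v|) :=
    List.map_congr_left (fun v hv => ero_eq nimi v h1 (hpre v hv))
  rw [hrw, sum_split]
  have hx : (nimet.map (fun v => |ord0 nimi - ord0 v|)).sum
      = distSum (ord0 nimi) (nimet.map ord0) := by
    simp [distSum, List.map_map, Function.comp_def]
  have hy : (nimet.map (fun v => |ord1 nimi - ord1 v|)).sum
      = distSum (ord1 nimi) (nimet.map ord1) := by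
    simp [distSum, List.map_map, Function.comp_def]
  rw [hx, hy,
    costs_correct (nimet.map ord0) (ord0 nimi) (List.mem_map_of_mem hni),
    costs_correct (nimet.map ord1) (ord1 nimi) (List.mem_map_of_mem hni)]
  simp
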